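-- pv_equiv track=rewrite | github.com/0xminion/ai-news-daily-digest | ai_news_digest/output/telegram.py | _split_bullet_blocks
-- ===== SOURCE A (Python) =====
-- def _split_bullet_blocks(raw: str) -> list[str]:
--     blocks = []
--     current = []
--     for line in raw.split('\n'):
--         stripped = line.rstrip()
--         if not stripped.strip():
--             if current:
--                 current.append('')
--             continue
--         if stripped.lstrip().startswith('- '):
--             if current:
--                 blocks.append('\n'.join(current).strip())
--             current = [stripped.strip()]
--         elif current:
--             current.append(stripped)
--     if current:
--         blocks.append('\n'.join(current).strip())
--     return blocks
-- ===== SOURCE B (Python) =====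
-- def _split_bullet_blocks(raw: str) -> list[str]:
--     def is_bullet(line: str) -> bool:
--         return line.strip().startswith('- ')
--
--     lines = raw.split('\n')
--     blocks = []
--     i, n = 0, len(lines)
--     while i < n:
--         if not is_bullet(lines[i]):
--             i += 1
--             continue
--         j = i + 1
--         while j < n and not is_bullet(lines[j]):
--             j += 1
--         body = [lines[i].strip()]
--         for line in lines[i + 1:j]:
--             body.append('' if not line.strip() else line.rstrip())
--         blocks.append('\n'.join(body).strip())
--         i = j
--     return blocks
-- ===== Notes on version B (the rewrite author's own statement) =====
-- stated objective: alternative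
-- what changed: Replaces A's single fold with a flushed `current` accumulator by a two-pointer scan that locates each bullet line and slices its continuation lines up to the next bullet, building every block directly.
import Mathlib
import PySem

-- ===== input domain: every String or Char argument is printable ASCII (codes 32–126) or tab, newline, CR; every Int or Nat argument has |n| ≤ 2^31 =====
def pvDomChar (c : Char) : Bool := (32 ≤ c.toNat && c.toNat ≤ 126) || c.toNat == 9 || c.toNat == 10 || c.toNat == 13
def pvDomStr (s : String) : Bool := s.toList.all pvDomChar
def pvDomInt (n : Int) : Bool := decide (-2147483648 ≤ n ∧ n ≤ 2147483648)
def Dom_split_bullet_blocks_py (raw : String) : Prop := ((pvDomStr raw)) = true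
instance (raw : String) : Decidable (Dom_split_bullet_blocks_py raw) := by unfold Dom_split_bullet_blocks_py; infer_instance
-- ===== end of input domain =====

-- B replaces A's running `current` accumulator (flushed whenever a new bullet arrives) by a
-- two-pointer scan that finds each bullet line and slices its continuation lines up to the next
-- bullet; objective: alternative decomposition, same cost.

-- ===== PORT A =====
-- state: (blocks, current) threaded through the lines of raw.split('\n'), exactly as A does
def pvALoop : List String → List String → List String → List String
  | [], blocks, cur =>
      if cur.isEmpty then blocks
      else blocks ++ [PySem.Str.strip (PySem.Str.join "\n" cur)]
  | l :: ls, blocks, cur =>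
      let stripped := PySem.Str.rstrip l
      if PySem.Str.strip stripped = "" then
        pvALoop ls blocks (if cur.isEmpty then cur else cur ++ [""])
      else if PySem.Str.startswith (PySem.Str.lstrip stripped) "- " then
        pvALoop ls
          (if cur.isEmpty then blocks
           else blocks ++ [PySem.Str.strip (PySem.Str.join "\n" cur)])
          [PySem.Str.strip stripped]
      else if cur.isEmpty then pvALoop ls blocks cur
      else pvALoop ls blocks (cur ++ [stripped])

def split_bullet_blocks_py (raw : String) : List String :=
  pvALoop ((PySem.Str.split? raw "\n").getD []) [] []   -- sep "\n" ≠ "", so split? is always `some`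

-- ===== PORT B =====
def pvIsBullet (line : String) : Bool :=
  PySem.Str.startswith (PySem.Str.strip line) "- "

def pvContLine (line : String) : String :=
  if PySem.Str.strip line = "" then "" else PySem.Str.rstrip line

-- the outer while loop over the suffix lines[i:]; the inner `while j` scan is the
-- takeWhile/dropWhile split of the rest at the next bullet line
def pvBGo : List String → List String
  | [] => []
  | l :: ls =>
      if pvIsBullet l then
        PySem.Str.strip (PySem.Str.join "\n"
            (PySem.Str.strip l :: (ls.takeWhile (fun x => !pvIsBullet x)).map pvContLine))
          :: pvBGo (ls.dropWhile (fun x => !pvIsBullet x))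
      else pvBGo ls
  termination_by ls => ls.length
  decreasing_by
    · exact Nat.lt_succ_of_le (List.length_dropWhile_le _ _)
    · exact Nat.lt_succ_of_le (Nat.le_refl _)

def split_bullet_blocks_py_alt (raw : String) : List String :=
  pvBGo ((PySem.Str.split? raw "\n").getD [])

-- ===== PRECONDITION & SPEC =====
def Spec_split_bullet_blocks_py (raw : String) (out : List String) : Prop := out = split_bullet_blocks_py_alt raw
instance (raw : String) (out : List String) : Decidable (Spec_split_bullet_blocks_py raw out) := by unfold Spec_split_bullet_blocks_py; infer_instance

-- ===== CLAIM (what is proved, stated in full; the proofs are below) =====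
def Claim_equal_split_bullet_blocks_py : Prop := ∀ (raw : String), Dom_split_bullet_blocks_py raw → Spec_split_bullet_blocks_py raw (split_bullet_blocks_py raw)

-- ===== LEMMAS AND PROOFS =====

theorem pv_dropWhile_idem {α : Type} (p : α → Bool) (l : List α) :
    List.dropWhile p (List.dropWhile p l) = List.dropWhile p l := by
  induction l with
  | nil => rfl
  | cons x xs ih =>
      by_cases h : p x
      · simp [List.dropWhile_cons, h, ih]
      · simp [List.dropWhile_cons, h]

theorem pv_rstrip_cons_not_space (c : Char) (cs : List Char)
    (h : PySem.Chars.isspace c = false) :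
    PySem.Chars.rstrip (c :: cs) = c :: PySem.Chars.rstrip cs := by
  show (List.dropWhile PySem.Chars.isspace (c :: cs).reverse).reverse = _
  rw [List.reverse_cons, List.dropWhile_append]
  by_cases he : (List.dropWhile PySem.Chars.isspace cs.reverse).isEmpty
  · rw [if_pos he]
    have h2 : PySem.Chars.rstrip cs = [] := by
      show (List.dropWhile PySem.Chars.isspace cs.reverse).reverse = []
      simp [List.isEmpty_iff] at he
      simpa using he
    rw [h2]
    simp [List.dropWhile_cons, h]
  · rw [if_neg he]
    simp [PySem.Chars.rstrip]

-- whitespace trimming from the two ends commutes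
theorem pv_lstrip_rstrip_comm (s : List Char) :
    PySem.Chars.lstrip (PySem.Chars.rstrip s) = PySem.Chars.rstrip (PySem.Chars.lstrip s) := by
  induction s with
  | nil => rfl
  | cons c cs ih =>
      by_cases h : PySem.Chars.isspace c
      · by_cases he : (List.dropWhile PySem.Chars.isspace cs.reverse).isEmpty
        · have h1 : PySem.Chars.rstrip (c :: cs) = [] := by
            show (List.dropWhile PySem.Chars.isspace (c :: cs).reverse).reverse = []
            rw [List.reverse_cons, List.dropWhile_append, if_pos he]
            simp [List.dropWhile_cons, h]
          have h2 : PySem.Chars.rstrip cs = [] := by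
            show (List.dropWhile PySem.Chars.isspace cs.reverse).reverse = []
            simp [List.isEmpty_iff] at he
            simpa using he
          rw [h1]
          show ([] : List Char) = PySem.Chars.rstrip (PySem.Chars.lstrip (c :: cs))
          simp only [PySem.Chars.lstrip, List.dropWhile_cons, h, if_pos]
          rw [show List.dropWhile PySem.Chars.isspace cs = PySem.Chars.lstrip cs from rfl, ← ih, h2]
          rfl
        · have h1 : PySem.Chars.rstrip (c :: cs) = c :: PySem.Chars.rstrip cs := by
            show (List.dropWhile PySem.Chars.isspace (c :: cs).reverse).reverse = _
            rw [List.reverse_cons, List.dropWhile_append, if_neg he]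
            simp [PySem.Chars.rstrip]
          rw [h1]
          show List.dropWhile PySem.Chars.isspace (c :: PySem.Chars.rstrip cs) = _
          rw [List.dropWhile_cons, if_pos h]
          rw [show List.dropWhile PySem.Chars.isspace (PySem.Chars.rstrip cs) = PySem.Chars.lstrip (PySem.Chars.rstrip cs) from rfl, ih]
          rw [show PySem.Chars.lstrip (c :: cs) = PySem.Chars.lstrip cs from by simp [PySem.Chars.lstrip, h]]
      · have hc : PySem.Chars.isspace c = false := by simpa using h
        rw [pv_rstrip_cons_not_space c cs hc]
        show List.dropWhile PySem.Chars.isspace (c :: PySem.Chars.rstrip cs) = _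
        rw [List.dropWhile_cons, if_neg (by simp [hc])]
        show _ = (List.dropWhile PySem.Chars.isspace (List.dropWhile PySem.Chars.isspace (c :: cs)).reverse).reverse
        rw [List.dropWhile_cons, if_neg (by simp [hc]), List.reverse_cons, List.dropWhile_append]
        by_cases he : (List.dropWhile PySem.Chars.isspace cs.reverse).isEmpty
        · rw [if_pos he]
          have h2 : PySem.Chars.rstrip cs = [] := by
            show (List.dropWhile PySem.Chars.isspace cs.reverse).reverse = []
            simp [List.isEmpty_iff] at he
            simpa using he
          rw [h2]
          simp [List.dropWhile_cons, hc]
        · rw [if_neg he]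
          simp [PySem.Chars.rstrip]

theorem pv_chars_lstrip_rstrip (s : List Char) :
    PySem.Chars.lstrip (PySem.Chars.rstrip s) = PySem.Chars.strip s :=
  pv_lstrip_rstrip_comm s

theorem pv_chars_strip_rstrip (s : List Char) :
    PySem.Chars.strip (PySem.Chars.rstrip s) = PySem.Chars.strip s := by
  show PySem.Chars.rstrip (PySem.Chars.lstrip (PySem.Chars.rstrip s)) = PySem.Chars.rstrip (PySem.Chars.lstrip s)
  rw [pv_lstrip_rstrip_comm]
  show (List.dropWhile _ (List.dropWhile _ (PySem.Chars.lstrip s).reverse).reverse.reverse).reverse = _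
  rw [List.reverse_reverse, pv_dropWhile_idem]
  rfl

theorem pv_str_strip_rstrip (l : String) :
    PySem.Str.strip (PySem.Str.rstrip l) = PySem.Str.strip l := by
  simp [PySem.Str.strip, PySem.Str.rstrip, pv_chars_strip_rstrip]

theorem pv_strip_empty_not_bullet (l : String) (h : PySem.Str.strip l = "") :
    pvIsBullet l = false := by
  simp [pvIsBullet, h]
  decide

-- the loop invariant: A's fold with pending state (blocks, cur) equals blocks, then the pending
-- block completed by the continuation lines up to the next bullet, then B's scan of the rest
theorem pvALoop_eq (lines : List String) : ∀ (blocks cur : List String),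
    pvALoop lines blocks cur =
      blocks ++ (if cur.isEmpty then pvBGo lines
        else PySem.Str.strip (PySem.Str.join "\n"
              (cur ++ (lines.takeWhile (fun x => !pvIsBullet x)).map pvContLine))
          :: pvBGo (lines.dropWhile (fun x => !pvIsBullet x))) := by
  induction lines with
  | nil =>
      intro blocks cur
      cases cur with
      | nil => simp [pvALoop, pvBGo]
      | cons a as => simp [pvALoop, pvBGo]
  | cons l ls ih =>
      intro blocks cur
      by_cases hb : PySem.Str.strip l = ""
      · -- blank line
        have hnb : pvIsBullet l = false := pv_strip_empty_not_bullet l hb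
        have hcond : PySem.Str.strip (PySem.Str.rstrip l) = "" := by
          rw [pv_str_strip_rstrip]; exact hb
        have hcl : pvContLine l = "" := by simp [pvContLine, hb]
        cases cur with
        | nil =>
            rw [show pvALoop (l :: ls) blocks [] = pvALoop ls blocks [] by
              simp [pvALoop, hcond]]
            rw [ih blocks []]
            simp [pvBGo, hnb]
        | cons a as =>
            rw [show pvALoop (l :: ls) blocks (a :: as) = pvALoop ls blocks ((a :: as) ++ [""]) by
              simp [pvALoop, hcond]]
            rw [ih blocks ((a :: as) ++ [""])]
            simp [List.takeWhile_cons, List.dropWhile_cons, hnb, hcl]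
      · by_cases hbl : pvIsBullet l = true
        · -- bullet line
          have hcond : ¬ PySem.Str.strip (PySem.Str.rstrip l) = "" := by
            rw [pv_str_strip_rstrip]; exact hb
          have hstartC : PySem.Chars.startswith
              (PySem.Chars.lstrip (PySem.Chars.rstrip l.toList)) ['-', ' '] = true := by
            rw [pv_chars_lstrip_rstrip]
            simpa [pvIsBullet] using hbl
          have hBgo : pvBGo (l :: ls) =
              PySem.Str.strip (PySem.Str.join "\n"
                  (PySem.Str.strip l :: (ls.takeWhile (fun x => !pvIsBullet x)).map pvContLine))
                :: pvBGo (ls.dropWhile (fun x => !pvIsBullet x)) := by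
            simp [pvBGo, hbl]
          cases cur with
          | nil =>
              rw [show pvALoop (l :: ls) blocks []
                    = pvALoop ls blocks [PySem.Str.strip (PySem.Str.rstrip l)] from by
                simp [pvALoop, hcond, hstartC]]
              rw [ih blocks [PySem.Str.strip (PySem.Str.rstrip l)], pv_str_strip_rstrip]
              simp [hBgo]
          | cons a as =>
              rw [show pvALoop (l :: ls) blocks (a :: as)
                    = pvALoop ls (blocks ++ [PySem.Str.strip (PySem.Str.join "\n" (a :: as))])
                        [PySem.Str.strip (PySem.Str.rstrip l)] from by
                simp [pvALoop, hcond, hstartC]]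
              rw [ih _ [PySem.Str.strip (PySem.Str.rstrip l)], pv_str_strip_rstrip]
              simp [List.takeWhile_cons, List.dropWhile_cons, hbl, hBgo]
        · -- ordinary continuation line
          have hnb : pvIsBullet l = false := by simpa using hbl
          have hcond : ¬ PySem.Str.strip (PySem.Str.rstrip l) = "" := by
            rw [pv_str_strip_rstrip]; exact hb
          have hstartC : PySem.Chars.startswith
              (PySem.Chars.lstrip (PySem.Chars.rstrip l.toList)) ['-', ' '] = false := by
            rw [pv_chars_lstrip_rstrip]
            simpa [pvIsBullet] using hnb
          have hcl : pvContLine l = PySem.Str.rstrip l := by simp [pvContLine, hb]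
          cases cur with
          | nil =>
              rw [show pvALoop (l :: ls) blocks [] = pvALoop ls blocks [] from by
                simp [pvALoop, hcond, hstartC]]
              rw [ih blocks []]
              simp [pvBGo, hnb]
          | cons a as =>
              rw [show pvALoop (l :: ls) blocks (a :: as)
                    = pvALoop ls blocks ((a :: as) ++ [PySem.Str.rstrip l]) from by
                simp [pvALoop, hcond, hstartC]]
              rw [ih blocks ((a :: as) ++ [PySem.Str.rstrip l])]
              simp [List.takeWhile_cons, List.dropWhile_cons, hnb, hcl]

-- ===== VERDICT (by name: the statement is the Claim_ definition above) =====
theorem split_bullet_blocks_py_spec : Claim_equal_split_bullet_blocks_py := by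
  intro raw _
  show split_bullet_blocks_py raw = split_bullet_blocks_py_alt raw
  unfold split_bullet_blocks_py split_bullet_blocks_py_alt
  rw [pvALoop_eq]
  simp
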